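-- pv_equiv track=rewrite | github.com/rsmith2271/Golf_Random_Groups | name_random_generator.py | compare_pairs_to_list
-- ===== SOURCE A (Python) =====
-- def compare_pairs_to_list(list_of_pairs, target_list):
--     results = []
--     for element in target_list:
--         for pair in list_of_pairs:
--             if pair[0] != element != pair[1]:
--                 results.append(element)
--                 break  # Exit inner loop if a match is found
--     return results
-- ===== SOURCE B (Python) =====
-- def compare_pairs_to_list(list_of_pairs, target_list):
--     # Count, for each value, how many pairs contain it; an element has a
--     # pair avoiding it iff its count is below the total number of pairs.
--     total = len(list_of_pairs)
--     counts = {}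
--     for a, b in list_of_pairs:
--         counts[a] = counts.get(a, 0) + 1
--         if b != a:
--             counts[b] = counts.get(b, 0) + 1
--     return [e for e in target_list if counts.get(e, 0) < total]
-- ===== Notes on version B (the rewrite author's own statement) =====
-- stated objective: alternative
-- what changed: Instead of scanning the pair list separately for every target element, B builds a dict counting how many pairs contain each value in one pass and keeps an element iff its count is below the total number of pairs.
import Mathlib
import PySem

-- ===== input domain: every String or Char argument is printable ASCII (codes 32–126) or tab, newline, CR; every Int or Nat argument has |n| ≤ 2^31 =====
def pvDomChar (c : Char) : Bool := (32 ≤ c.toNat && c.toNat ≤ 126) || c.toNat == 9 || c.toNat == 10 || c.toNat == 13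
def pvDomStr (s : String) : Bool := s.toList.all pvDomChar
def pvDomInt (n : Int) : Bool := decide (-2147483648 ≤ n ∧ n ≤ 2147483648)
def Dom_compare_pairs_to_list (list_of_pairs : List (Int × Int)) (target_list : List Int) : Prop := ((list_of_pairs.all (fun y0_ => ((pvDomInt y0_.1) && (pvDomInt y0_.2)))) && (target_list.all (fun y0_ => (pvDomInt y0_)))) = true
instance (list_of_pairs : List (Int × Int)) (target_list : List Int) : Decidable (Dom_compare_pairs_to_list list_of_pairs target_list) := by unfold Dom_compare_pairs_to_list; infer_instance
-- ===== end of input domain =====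

-- ===== PORT A =====
-- B replaces A's per-element scan of all pairs by a one-pass count of pairs
-- containing each value (objective: alternative algorithm).

-- inner loop of A: scan pairs, append element on the first pair not containing it (break)
def pvInnerA (e : Int) (pairs : List (Int × Int)) (results : List Int) : List Int :=
  match pairs with
  | [] => results
  | p :: ps => if p.1 ≠ e ∧ e ≠ p.2 then results ++ [e] else pvInnerA e ps results

def compare_pairs_to_list (list_of_pairs : List (Int × Int)) (target_list : List Int) : List Int :=
  target_list.foldl (fun results e => pvInnerA e list_of_pairs results) []

-- ===== PORT B =====
def pvStepB (d : PySem.Dict Int Int) (p : Int × Int) : PySem.Dict Int Int :=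
  let d1 := d.modify p.1 0 (· + 1)
  if p.2 ≠ p.1 then d1.modify p.2 0 (· + 1) else d1

def compare_pairs_to_list_alt (list_of_pairs : List (Int × Int)) (target_list : List Int) : List Int :=
  let total : Int := list_of_pairs.length
  let counts := list_of_pairs.foldl pvStepB PySem.Dict.empty
  target_list.filter (fun e => counts.getD e 0 < total)

-- ===== PRECONDITION & SPEC =====
def Spec_compare_pairs_to_list (list_of_pairs : List (Int × Int)) (target_list : List Int) (out : List Int) : Prop := out = compare_pairs_to_list_alt list_of_pairs target_list
instance (list_of_pairs : List (Int × Int)) (target_list : List Int) (out : List Int) : Decidable (Spec_compare_pairs_to_list list_of_pairs target_list out) := by unfold Spec_compare_pairs_to_list; infer_instance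

-- ===== CLAIM (what is proved, stated in full; the proofs are below) =====
def Claim_equal_compare_pairs_to_list : Prop := ∀ (list_of_pairs : List (Int × Int)) (target_list : List Int), Dom_compare_pairs_to_list list_of_pairs target_list → Spec_compare_pairs_to_list list_of_pairs target_list (compare_pairs_to_list list_of_pairs target_list)

-- ===== LEMMAS AND PROOFS =====

-- the count dict built by B's loop: getD v 0 = number of pairs containing v
theorem pvCounts_getD (l : List (Int × Int)) (d : PySem.Dict Int Int) (v : Int) :
    (l.foldl pvStepB d).getD v 0 =
      d.getD v 0 + (l.countP (fun p => p.1 = v ∨ p.2 = v) : Int) := by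
  induction l generalizing d with
  | nil => simp
  | cons p ps ih =>
    simp only [List.foldl_cons, ih, List.countP_cons]
    unfold pvStepB
    by_cases h : p.2 ≠ p.1
    · rw [if_pos h, PySem.Dict.getD_modify, PySem.Dict.getD_modify]
      by_cases h1 : v = p.1 <;> by_cases h2 : v = p.2 <;>
        simp_all [PySem.Dict.getD_modify] <;> omega
    · rw [if_neg h, PySem.Dict.getD_modify]
      push_neg at h
      by_cases h1 : v = p.1 <;> simp_all <;> omega

-- A's inner loop appends e iff some pair avoids e
theorem pvInnerA_eq (e : Int) (pairs : List (Int × Int)) (results : List Int) :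
    pvInnerA e pairs results =
      if pairs.any (fun p => decide (p.1 ≠ e ∧ e ≠ p.2)) then results ++ [e] else results := by
  induction pairs with
  | nil => simp [pvInnerA]
  | cons p ps ih =>
    unfold pvInnerA
    by_cases h : p.1 ≠ e ∧ e ≠ p.2
    · simp [h]
    · rw [if_neg h, ih]
      simp only [List.any_cons, decide_eq_false h, Bool.false_or]

theorem pvAny_iff_count_lt (e : Int) (pairs : List (Int × Int)) :
    (pairs.any (fun p => decide (p.1 ≠ e ∧ e ≠ p.2)) = true) ↔
      (pairs.countP (fun p => p.1 = e ∨ p.2 = e) : Int) < (pairs.length : Int) := by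
  rw [Nat.cast_lt, List.any_eq_true]
  constructor
  · rintro ⟨p, hp, hpd⟩
    simp only [decide_eq_true_eq] at hpd
    refine lt_of_le_of_ne List.countP_le_length (fun hlen => ?_)
    have := List.countP_eq_length.mp hlen p hp
    simp only [decide_eq_true_eq] at this
    rcases this with h1 | h2
    · exact hpd.1 h1
    · exact hpd.2 h2.symm
  · intro h
    by_contra hno
    push_neg at hno
    have hall : ∀ q ∈ pairs, decide (q.1 = e ∨ q.2 = e) = true := by
      intro q hq
      have hq' := hno q hq
      rw [decide_eq_true_eq]
      by_cases h1 : q.1 = e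
      · exact Or.inl h1
      · by_cases h2 : q.2 = e
        · exact Or.inr h2
        · exact absurd (decide_eq_true ⟨h1, fun he => h2 he.symm⟩) hq'
    exact absurd (List.countP_eq_length.mpr hall) (Nat.ne_of_lt h)

-- ===== VERDICT (by name: the statement is the Claim_ definition above) =====
theorem compare_pairs_to_list_spec : Claim_equal_compare_pairs_to_list := by
  intro pairs target _
  unfold Spec_compare_pairs_to_list compare_pairs_to_list compare_pairs_to_list_alt
  have hfold : target.foldl (fun results e => pvInnerA e pairs results) [] =
      target.foldl (fun results e =>
        if pairs.any (fun p => decide (p.1 ≠ e ∧ e ≠ p.2)) then results ++ [e] else results) [] := by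
    apply PySem.List.foldl_congr_mem
    intro acc x _
    exact pvInnerA_eq x pairs acc
  rw [hfold, PySem.List.foldl_append_if_eq_filter]
  simp only [List.nil_append]
  apply List.filter_congr
  intro e _
  have hiff := pvAny_iff_count_lt e pairs
  rw [pvCounts_getD]
  simp only [PySem.Dict.getD_empty, zero_add]
  rw [Bool.eq_iff_iff, decide_eq_true_iff]
  exact hiff
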